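-- pv_equiv track=rewrite | github.com/RoryBarnes/vaibify | _downloads/888e1fec7153b0865c96042fd2fdd1a0/dependencyPinning.py | _flistParseLockEntries
-- ===== SOURCE A (Python) =====
-- def _flistParseLockEntries(sContents):
--     """Group lockfile lines into one block per dependency.
--
--     A dependency block starts with a non-comment, non-indented line
--     naming the package and continues across continuation lines (those
--     starting with whitespace, ``--hash=``, or a backslash from the
--     previous line).
--     """
--     listEntries = []
--     listCurrent = []
--     for sLine in sContents.splitlines():
--         if not sLine.strip() or sLine.lstrip().startswith("#"):
--             continue
--         if sLine[:1].isspace() or sLine.lstrip().startswith("--hash"):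
--             listCurrent.append(sLine)
--             continue
--         if listCurrent:
--             listEntries.append(listCurrent)
--         listCurrent = [sLine]
--     if listCurrent:
--         listEntries.append(listCurrent)
--     return listEntries
-- ===== SOURCE B (Python) =====
-- def _flistParseLockEntries(sContents):
--     """Group lockfile lines into one block per dependency.
--
--     Different decomposition: first drop blank/comment lines, then a
--     two-pointer scan over the cleaned list slices out each block
--     (a head line plus its run of continuation lines).
--     """
--     lines = [l for l in sContents.splitlines()
--              if l.strip() and not l.lstrip().startswith("#")]
--     out = []
--     i = 0
--     n = len(lines)
--     while i < n:
--         j = i + 1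
--         while j < n and (lines[j][:1].isspace()
--                          or lines[j].lstrip().startswith("--hash")):
--             j += 1
--         out.append(lines[i:j])
--         i = j
--     return out
-- ===== Notes on version B (the rewrite author's own statement) =====
-- stated objective: alternative
-- what changed: Replaced the accumulate-and-flush state machine by a filter pass that drops blank/comment lines followed by a two-pointer scan that slices the cleaned list into blocks at header lines.
import Mathlib
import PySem

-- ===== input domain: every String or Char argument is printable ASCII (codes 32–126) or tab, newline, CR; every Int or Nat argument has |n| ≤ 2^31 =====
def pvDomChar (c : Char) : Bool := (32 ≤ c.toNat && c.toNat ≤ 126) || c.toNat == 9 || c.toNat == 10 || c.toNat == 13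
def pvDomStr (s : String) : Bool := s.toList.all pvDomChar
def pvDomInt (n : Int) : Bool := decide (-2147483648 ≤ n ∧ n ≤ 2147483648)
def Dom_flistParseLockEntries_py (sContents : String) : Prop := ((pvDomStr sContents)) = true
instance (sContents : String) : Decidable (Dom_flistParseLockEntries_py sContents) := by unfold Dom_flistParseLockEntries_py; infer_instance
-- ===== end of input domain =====

-- B changes the decomposition: a filter pass dropping blank/comment lines, then
-- a scan slicing the cleaned list into blocks at header lines (objective: alternative).

-- ===== PORT A =====
-- 'not sLine.strip() or sLine.lstrip().startswith("#")'
def pvSkip (s : String) : Bool :=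
  PySem.Str.strip s == "" || PySem.Str.startswith (PySem.Str.lstrip s) "#"

-- 'sLine[:1].isspace() or sLine.lstrip().startswith("--hash")'
def pvCont (s : String) : Bool :=
  PySem.Str.strIsspace (PySem.Str.slice s none (some 1))
    || PySem.Str.startswith (PySem.Str.lstrip s) "--hash"

-- the loop body of A, state = (listEntries, listCurrent)
def pvStepA (st : List (List String) × List String) (sLine : String) :
    List (List String) × List String :=
  if pvSkip sLine then st
  else if pvCont sLine then (st.1, st.2 ++ [sLine])
  else if st.2 ≠ [] then (st.1 ++ [st.2], [sLine])
  else (st.1, [sLine])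

def flistParseLockEntries_py (sContents : String) : List (List String) :=
  let st := (PySem.Str.splitlines sContents).foldl pvStepA ([], [])
  if st.2 ≠ [] then st.1 ++ [st.2] else st.1

-- ===== PORT B =====
-- B's outer while loop, one iteration per recursive call on the remaining
-- suffix of the cleaned list: lines[i:j] is the head line plus the run of
-- continuation lines after it (the inner while = takeWhile), i = j advances
-- to the rest (dropWhile).
def pvBlocksB : List String → List (List String)
  | [] => []
  | l :: ls => (l :: ls.takeWhile pvCont) :: pvBlocksB (ls.dropWhile pvCont)
  termination_by ls => ls.length
  decreasing_by
    have := List.length_dropWhile_le pvCont ls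
    simp only [List.length_cons]
    omega

def flistParseLockEntries_py_alt (sContents : String) : List (List String) :=
  pvBlocksB ((PySem.Str.splitlines sContents).filter (fun l => !pvSkip l))

-- ===== PRECONDITION & SPEC =====
def Spec_flistParseLockEntries_py (sContents : String) (out : List (List String)) : Prop := out = flistParseLockEntries_py_alt sContents
instance (sContents : String) (out : List (List String)) : Decidable (Spec_flistParseLockEntries_py sContents out) := by unfold Spec_flistParseLockEntries_py; infer_instance

-- ===== CLAIM (what is proved, stated in full; the proofs are below) =====
def Claim_equal_flistParseLockEntries_py : Prop := ∀ (sContents : String), Dom_flistParseLockEntries_py sContents → Spec_flistParseLockEntries_py sContents (flistParseLockEntries_py sContents)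

-- ===== LEMMAS AND PROOFS =====

-- skipped lines leave A's state unchanged, so the fold may run over the filtered list
theorem pv_foldl_filter (ls : List String) (st : List (List String) × List String) :
    ls.foldl pvStepA st = (ls.filter (fun l => !pvSkip l)).foldl pvStepA st := by
  induction ls generalizing st with
  | nil => rfl
  | cons l ls ih =>
    by_cases h : pvSkip l
    · simp [h, pvStepA, ih]
    · simp [h, ih]

-- A's flush of the final state
def pvFlush (st : List (List String) × List String) : List (List String) :=
  if st.2 ≠ [] then st.1 ++ [st.2] else st.1

-- main invariant: with a nonempty current block, the flushed fold over a
-- skip-free list is the blocks decomposition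
theorem pv_main (ls : List String) (es : List (List String)) (cur : List String)
    (hskip : ∀ l ∈ ls, pvSkip l = false) (hcur : cur ≠ []) :
    pvFlush (ls.foldl pvStepA (es, cur)) =
      es ++ ((cur ++ ls.takeWhile pvCont) :: pvBlocksB (ls.dropWhile pvCont)) := by
  induction ls generalizing es cur with
  | nil => simp [pvFlush, hcur, pvBlocksB.eq_1]
  | cons l ls ih =>
    have hl : pvSkip l = false := hskip l (List.mem_cons_self ..)
    have hskip' : ∀ x ∈ ls, pvSkip x = false := fun x hx => hskip x (List.mem_cons_of_mem _ hx)
    by_cases hc : pvCont l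
    · have := ih (es := es) (cur := cur ++ [l]) hskip' (by simp)
      simp only [List.foldl_cons, pvStepA, hl, Bool.false_eq_true, if_false, hc, if_true,
        List.takeWhile_cons, List.dropWhile_cons] at *
      simp [this]
    · have := ih (es := es ++ [cur]) (cur := [l]) hskip' (by simp)
      simp only [List.foldl_cons, pvStepA, hl, Bool.false_eq_true, if_false, hc, if_true,
        hcur, ne_eq, not_false_iff, List.takeWhile_cons, List.dropWhile_cons] at *
      rw [pvBlocksB]
      simp [this]

theorem pv_eq (sContents : String) :
    flistParseLockEntries_py sContents = flistParseLockEntries_py_alt sContents := by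
  unfold flistParseLockEntries_py flistParseLockEntries_py_alt
  rw [pv_foldl_filter]
  generalize hfl : (PySem.Str.splitlines sContents).filter (fun l => !pvSkip l) = fls
  have hskip : ∀ l ∈ fls, pvSkip l = false := by
    intro l hl
    rw [← hfl] at hl
    simpa using (List.of_mem_filter hl)
  cases fls with
  | nil => simp [pvBlocksB.eq_1]
  | cons l ls =>
    have hl : pvSkip l = false := hskip l (List.mem_cons_self ..)
    have hskip' : ∀ x ∈ ls, pvSkip x = false := fun x hx => hskip x (List.mem_cons_of_mem _ hx)
    have h1 : pvStepA ([], []) l = ([], [l]) := by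
      simp [pvStepA, hl]
    have := pv_main ls [] [l] hskip' (by simp)
    simp only [List.foldl_cons, h1]
    show pvFlush (ls.foldl pvStepA ([], [l])) = _
    rw [this, pvBlocksB]
    simp

-- ===== VERDICT (by name: the statement is the Claim_ definition above) =====
theorem flistParseLockEntries_py_spec : Claim_equal_flistParseLockEntries_py := by
  intro s _
  unfold Spec_flistParseLockEntries_py
  exact pv_eq s
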